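-- pv_equiv track=rewrite | github.com/alexahs/adventofcode | 2020/day6/customs.py | build_grps
-- ===== SOURCE A (Python) =====
-- def build_grps(inp):
--     groups = []
--     tmp_grp = ""
--     grp_size = 0
--     for i, line in enumerate(inp):
--         if line == "\n":
--             groups.append((grp_size, tmp_grp))
--             tmp_grp = ""
--             grp_size = 0
--             continue
--         tmp_grp += line.strip("\n")
--         grp_size += 1
--     groups.append((grp_size, tmp_grp))
--     return groups
-- ===== SOURCE B (Python) =====
-- def build_grps(inp):
--     # Two-phase: first cut the input into segments at separator lines, then map each segment to its (size, concatenation).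
--     segments = []
--     start = 0
--     for i, line in enumerate(inp):
--         if line == "\n":
--             segments.append(inp[start:i])
--             start = i + 1
--     segments.append(inp[start:])
--     return [(len(seg), "".join(l.strip("\n") for l in seg)) for seg in segments]
-- ===== Notes on version B (the rewrite author's own statement) =====
-- stated objective: alternative
-- what changed: Replaces A's single flush-accumulator loop (running string + counter reset at each separator) with a two-phase split: cut the input into segments by the indices of separator lines, then map each segment to (len, joined stripped lines).
import Mathlib
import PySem

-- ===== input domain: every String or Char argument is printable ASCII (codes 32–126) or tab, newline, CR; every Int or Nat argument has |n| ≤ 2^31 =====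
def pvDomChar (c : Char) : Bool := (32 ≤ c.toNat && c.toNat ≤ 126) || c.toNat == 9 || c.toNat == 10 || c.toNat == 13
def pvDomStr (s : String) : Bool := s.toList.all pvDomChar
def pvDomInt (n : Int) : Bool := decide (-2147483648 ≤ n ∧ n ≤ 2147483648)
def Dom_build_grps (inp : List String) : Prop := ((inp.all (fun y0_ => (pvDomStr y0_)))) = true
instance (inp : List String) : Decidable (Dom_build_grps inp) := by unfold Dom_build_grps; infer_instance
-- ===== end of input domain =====

-- B re-implements the flush loop as a two-phase split (cut at separator indices, then map each
-- segment to its (size, joined-strip)); equal return value, objective: alternative decomposition.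

-- ===== PORT A =====
-- A iterates 'for i, line in enumerate(inp)' but never uses i, so the fold runs over inp directly.
def build_grps (inp : List String) : List (Int × String) :=
  let st := inp.foldl
    (fun (st : List (Int × String) × String × Int) line =>
      if line == "\n" then (st.1 ++ [(st.2.2, st.2.1)], "", 0)
      else (st.1, st.2.1 ++ PySem.Str.stripChars line "\n", st.2.2 + 1))
    ([], "", 0)
  st.1 ++ [(st.2.2, st.2.1)]

-- ===== PORT B =====
def build_grps_alt (inp : List String) : List (Int × String) :=
  let st := (PySem.List.enumerate inp).foldl
    (fun (st : List (List String) × Int) p =>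
      if p.2 == "\n" then (st.1 ++ [PySem.List.slice inp (some st.2) (some p.1)], p.1 + 1)
      else st)
    (([] : List (List String)), (0 : Int))
  let segments := st.1 ++ [PySem.List.slice inp (some st.2) none]
  segments.map (fun seg =>
    ((seg.length : Int), PySem.Str.join "" (seg.map (fun l => PySem.Str.stripChars l "\n"))))

-- ===== PRECONDITION & SPEC =====
def Spec_build_grps (inp : List String) (out : List (Int × String)) : Prop := out = build_grps_alt inp
instance (inp : List String) (out : List (Int × String)) : Decidable (Spec_build_grps inp out) := by unfold Spec_build_grps; infer_instance

-- ===== CLAIM (what is proved, stated in full; the proofs are below) =====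
def Claim_equal_build_grps : Prop := ∀ (inp : List String), Dom_build_grps inp → Spec_build_grps inp (build_grps inp)

-- ===== LEMMAS AND PROOFS =====

-- (first segment, remaining segments) of a line list, cut at "\n" lines
def pvSegs : List String → List String × List (List String)
  | [] => ([], [])
  | l :: ls =>
    let p := pvSegs ls
    if l == "\n" then ([], p.1 :: p.2) else (l :: p.1, p.2)

def pvJ (seg : List String) : String :=
  PySem.Str.join "" (seg.map (fun l => PySem.Str.stripChars l "\n"))

def pvF (seg : List String) : Int × String := ((seg.length : Int), pvJ seg)

theorem join_empty_cons (x : String) (xs : List String) :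
    PySem.Str.join "" (x :: xs) = x ++ PySem.Str.join "" xs := by
  cases xs with
  | nil => simp [PySem.Str.join, PySem.Chars.join_singleton, PySem.Chars.join_nil]
  | cons y ys => simp [PySem.Str.join, PySem.Chars.join_cons_cons]

theorem pvJ_nil : pvJ [] = "" := by
  simp [pvJ, PySem.Str.join, PySem.Chars.join_nil]

theorem pvJ_cons (l : String) (ls : List String) :
    pvJ (l :: ls) = PySem.Str.stripChars l "\n" ++ pvJ ls := by
  simp [pvJ, join_empty_cons]

-- A's flush loop, from an arbitrary state, produces the pending group merged with the first segment.
theorem A_inv (xs : List String) (g : List (Int × String)) (t : String) (n : Int) :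
    (xs.foldl
        (fun (st : List (Int × String) × String × Int) line =>
          if line == "\n" then (st.1 ++ [(st.2.2, st.2.1)], "", 0)
          else (st.1, st.2.1 ++ PySem.Str.stripChars line "\n", st.2.2 + 1))
        (g, t, n)).1 ++
      [((xs.foldl
        (fun (st : List (Int × String) × String × Int) line =>
          if line == "\n" then (st.1 ++ [(st.2.2, st.2.1)], "", 0)
          else (st.1, st.2.1 ++ PySem.Str.stripChars line "\n", st.2.2 + 1))
        (g, t, n)).2.2,
        (xs.foldl
        (fun (st : List (Int × String) × String × Int) line =>
          if line == "\n" then (st.1 ++ [(st.2.2, st.2.1)], "", 0)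
          else (st.1, st.2.1 ++ PySem.Str.stripChars line "\n", st.2.2 + 1))
        (g, t, n)).2.1)]
    = g ++ (n + ((pvSegs xs).1.length : Int), t ++ pvJ (pvSegs xs).1) :: ((pvSegs xs).2.map pvF) := by
  induction xs generalizing g t n with
  | nil => simp [pvSegs, pvJ_nil]
  | cons l ls ih =>
    by_cases h : l = "\n"
    · simp only [List.foldl_cons, h, BEq.rfl, if_pos]
      rw [ih]
      simp [pvSegs, pvF, pvJ, PySem.Str.join, PySem.Chars.join_nil]
    · have hb : (l == "\n") = false := by simp [h]
      simp only [List.foldl_cons, pvSegs, hb, Bool.false_eq_true, if_false]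
      rw [ih]
      simp [pvJ_cons, String.append_assoc]
      omega

-- B's index loop, run over the suffix xs of inp = pre ++ xs with cursor start ≤ |pre|,
-- produces the pending slice pre[start:] merged with the first segment of xs.
theorem B_inv (xs pre : List String) (acc : List (List String)) (start : Nat)
    (hs : start ≤ pre.length) :
    ((PySem.List.enumerate xs (pre.length : Int)).foldl
        (fun (st : List (List String) × Int) p =>
          if p.2 == "\n" then
            (st.1 ++ [PySem.List.slice (pre ++ xs) (some st.2) (some p.1)], p.1 + 1)
          else st)
        (acc, (start : Int))).1 ++
      [PySem.List.slice (pre ++ xs)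
        (some ((PySem.List.enumerate xs (pre.length : Int)).foldl
        (fun (st : List (List String) × Int) p =>
          if p.2 == "\n" then
            (st.1 ++ [PySem.List.slice (pre ++ xs) (some st.2) (some p.1)], p.1 + 1)
          else st)
        (acc, (start : Int))).2) none]
    = acc ++ ((pre.drop start ++ (pvSegs xs).1) :: (pvSegs xs).2) := by
  induction xs generalizing pre acc start with
  | nil =>
    simp [PySem.List.enumerate_nil, pvSegs, PySem.List.slice_from_natCast]
  | cons l ls ih =>
    rw [PySem.List.enumerate_cons]
    by_cases h : l = "\n"
    · subst h
      simp only [List.foldl_cons, BEq.rfl, if_pos]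
      have hslice : PySem.List.slice (pre ++ "\n" :: ls) (some (start : Int)) (some ((pre.length : Nat) : Int))
          = pre.drop start := by
        rw [PySem.List.slice_natCast, List.drop_append_of_le_length hs]
        have hlen : (pre.drop start).length = pre.length - start := by simp
        rw [List.take_append_of_le_length (by omega), List.take_of_length_le (by omega)]
      rw [hslice]
      have hassoc : pre ++ "\n" :: ls = (pre ++ ["\n"]) ++ ls := by simp
      rw [hassoc]
      have hcast : ((pre.length : Int) + 1) = (((pre ++ ["\n"]).length : Nat) : Int) := by simp
      rw [hcast]
      rw [ih (pre ++ ["\n"]) (acc ++ [pre.drop start]) (pre ++ ["\n"]).length (le_refl _)]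
      simp [pvSegs]
    · have hb : (l == "\n") = false := by simp [h]
      simp only [List.foldl_cons, hb, Bool.false_eq_true, if_false]
      have hassoc : pre ++ l :: ls = (pre ++ [l]) ++ ls := by simp
      rw [hassoc]
      have hcast : ((pre.length : Int) + 1) = (((pre ++ [l]).length : Nat) : Int) := by simp
      rw [hcast]
      rw [ih (pre ++ [l]) acc start (by simp; omega)]
      rw [List.drop_append_of_le_length hs]
      simp [pvSegs, hb]

theorem B_eq (inp : List String) :
    build_grps_alt inp = pvF (pvSegs inp).1 :: ((pvSegs inp).2.map pvF) := by
  show (((PySem.List.enumerate inp).foldl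
        (fun (st : List (List String) × Int) p =>
          if p.2 == "\n" then
            (st.1 ++ [PySem.List.slice inp (some st.2) (some p.1)], p.1 + 1)
          else st)
        (([] : List (List String)), (0 : Int))).1 ++
      [PySem.List.slice inp
        (some (((PySem.List.enumerate inp).foldl
        (fun (st : List (List String) × Int) p =>
          if p.2 == "\n" then
            (st.1 ++ [PySem.List.slice inp (some st.2) (some p.1)], p.1 + 1)
          else st)
        (([] : List (List String)), (0 : Int))).2)) none]).map
      (fun seg => ((seg.length : Int),
        PySem.Str.join "" (seg.map (fun l => PySem.Str.stripChars l "\n"))))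
    = pvF (pvSegs inp).1 :: ((pvSegs inp).2.map pvF)
  have h := B_inv inp [] [] 0 (by simp)
  simp only [List.nil_append, List.length_nil, Nat.cast_zero, List.drop_nil] at h
  rw [h]
  simp [pvF, pvJ]

theorem A_eq (inp : List String) :
    build_grps inp = pvF (pvSegs inp).1 :: ((pvSegs inp).2.map pvF) := by
  show (inp.foldl
        (fun (st : List (Int × String) × String × Int) line =>
          if line == "\n" then (st.1 ++ [(st.2.2, st.2.1)], "", 0)
          else (st.1, st.2.1 ++ PySem.Str.stripChars line "\n", st.2.2 + 1))
        ([], "", 0)).1 ++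
      [((inp.foldl
        (fun (st : List (Int × String) × String × Int) line =>
          if line == "\n" then (st.1 ++ [(st.2.2, st.2.1)], "", 0)
          else (st.1, st.2.1 ++ PySem.Str.stripChars line "\n", st.2.2 + 1))
        ([], "", 0)).2.2,
        (inp.foldl
        (fun (st : List (Int × String) × String × Int) line =>
          if line == "\n" then (st.1 ++ [(st.2.2, st.2.1)], "", 0)
          else (st.1, st.2.1 ++ PySem.Str.stripChars line "\n", st.2.2 + 1))
        ([], "", 0)).2.1)]
    = pvF (pvSegs inp).1 :: ((pvSegs inp).2.map pvF)
  rw [A_inv]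
  simp [pvF]

-- ===== VERDICT (by name: the statement is the Claim_ definition above) =====
theorem build_grps_spec : Claim_equal_build_grps := by
  intro inp _
  unfold Spec_build_grps
  rw [A_eq, B_eq]
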